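-- pv_equiv track=rewrite | github.com/renta0426/NVIDIA-Nemotron-Model-Reasoning-Challenge | data/symbol_rule_analysis_2026-04-20/analyze_symbol_rules.py | relation_signature
-- ===== SOURCE A (Python) =====
-- def relation_signature(left: str, right: str) -> str:
--     mapping: dict[str, str] = {}
--     next_id = 0
--     left_pattern = []
--     for ch in left:
--         if ch not in mapping:
--             mapping[ch] = str(next_id)
--             next_id += 1
--         left_pattern.append(mapping[ch])
--     right_pattern = [mapping[ch] if ch in mapping else "N" for ch in right]
--     return "".join(left_pattern) + "->" + "".join(right_pattern)
-- ===== SOURCE B (Python) =====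
-- def relation_signature(left: str, right: str) -> str:
--     # id of ch = number of distinct characters before ch's first occurrence in left;
--     # no mapping dict is ever built.
--     def ident(ch: str) -> str:
--         return str(len(set(left[:left.index(ch)])))
--     lp = "".join(ident(ch) for ch in left)
--     rp = "".join(ident(ch) if ch in left else "N" for ch in right)
--     return lp + "->" + rp
-- ===== Notes on version B (the rewrite author's own statement) =====
-- stated objective: alternative
-- what changed: B builds no mapping dict at all: each character's id is recomputed on the fly as len(set(left[:left.index(ch)])) -- the number of distinct characters before its first occurrence -- which equals the sequential first-appearance id A assigns with a dict and counter.
import Mathlib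
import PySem

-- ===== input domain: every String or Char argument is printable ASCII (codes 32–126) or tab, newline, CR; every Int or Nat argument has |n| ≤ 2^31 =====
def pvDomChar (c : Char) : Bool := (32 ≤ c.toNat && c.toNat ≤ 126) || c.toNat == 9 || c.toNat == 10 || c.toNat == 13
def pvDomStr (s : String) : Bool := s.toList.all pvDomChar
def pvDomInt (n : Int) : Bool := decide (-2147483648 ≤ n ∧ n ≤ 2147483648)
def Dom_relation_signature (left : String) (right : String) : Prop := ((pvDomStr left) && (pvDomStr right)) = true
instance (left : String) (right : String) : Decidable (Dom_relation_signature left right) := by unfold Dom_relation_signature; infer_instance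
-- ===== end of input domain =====

-- B builds no mapping dict at all: each character's id is recomputed directly as the
-- number of distinct characters before its first occurrence in left (objective: alternative).

-- ===== PORT A =====
def relation_signature (left : String) (right : String) : String :=
  let st := left.toList.foldl
    (fun (st : PySem.Dict Char String × Int × List String) ch =>
      let mn := if st.1.contains ch then (st.1, st.2.1)
                else (st.1.insert ch (PySem.Int.toStr st.2.1), st.2.1 + 1)
      (mn.1, mn.2, st.2.2 ++ [mn.1.getD ch ""]))
    (PySem.Dict.empty, 0, [])
  let right_pattern := right.toList.map
    (fun ch => if st.1.contains ch then st.1.getD ch "" else "N")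
  PySem.Str.join "" st.2.2 ++ "->" ++ PySem.Str.join "" right_pattern

-- ===== PORT B =====
-- str(len(set(left[:left.index(ch)]))); left.index(ch) ported as List.idxOf — exact
-- whenever ch ∈ left, and B only calls ident on such ch (Python would raise otherwise).
def rs_ident (L : List Char) (ch : Char) : String :=
  PySem.Int.toStr (((PySem.Set.ofList (L.take (L.idxOf ch))).length : Int))

def relation_signature_alt (left : String) (right : String) : String :=
  let lp := PySem.Str.join "" (left.toList.map (fun ch => rs_ident left.toList ch))
  let rp := PySem.Str.join "" (right.toList.map
    (fun ch => if ch ∈ left.toList then rs_ident left.toList ch else "N"))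
  lp ++ "->" ++ rp

-- ===== PRECONDITION & SPEC =====
def Spec_relation_signature (left : String) (right : String) (out : String) : Prop := out = relation_signature_alt left right
instance (left : String) (right : String) (out : String) : Decidable (Spec_relation_signature left right out) := by unfold Spec_relation_signature; infer_instance

-- ===== CLAIM =====
def Claim_equal_relation_signature : Prop := ∀ (left : String) (right : String), Dom_relation_signature left right → Spec_relation_signature left right (relation_signature left right)

-- ===== LEMMAS AND PROOFS =====

-- proof-only model of A's dict: maps each char of p (first occurrences) to its id
def pvMap (cs : List Char) : PySem.Dict Char String :=
  PySem.Dict.ofList ((PySem.List.enumerate (PySem.List.dedup cs)).map (fun p => (p.2, PySem.Int.toStr p.1)))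

lemma pv_ofList_append_singleton (xs : List (Char × String)) (k : Char) (v : String) :
    PySem.Dict.ofList (xs ++ [(k, v)]) = (PySem.Dict.ofList xs).insert k v := by
  simp [PySem.Dict.ofList, PySem.Dict.update, List.foldl_append]

lemma pv_dedup_append_singleton (p : List Char) (c : Char) :
    PySem.List.dedup (p ++ [c]) =
      if c ∈ p then PySem.List.dedup p else PySem.List.dedup p ++ [c] := by
  have : PySem.List.dedup (p ++ [c]) = PySem.Set.add (PySem.List.dedup p) c := by
    simp [PySem.Set.ofList_eq_foldl, List.foldl_append]
  rw [this]
  by_cases h : c ∈ p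
  · rw [if_pos h]; simp [PySem.Set.add, PySem.Set.contains, h]
  · rw [if_neg h]; simp [PySem.Set.add, PySem.Set.contains, h]

lemma pv_M_append_singleton (p : List Char) (c : Char) :
    pvMap (p ++ [c]) =
      if c ∈ p then pvMap p
      else (pvMap p).insert c (PySem.Int.toStr ((PySem.List.dedup p).length : Int)) := by
  unfold pvMap
  rw [pv_dedup_append_singleton]
  by_cases h : c ∈ p
  · simp [h]
  · rw [if_neg h, if_neg h, PySem.List.enumerate_append]
    simp [pv_ofList_append_singleton]

lemma pv_M_keys (p : List Char) :
    (pvMap p).keys = PySem.List.dedup p := by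
  induction p using List.reverseRecOn with
  | nil => simp [pvMap, PySem.Dict.ofList, PySem.Dict.update]
  | append_singleton p c ih =>
    rw [pv_M_append_singleton, pv_dedup_append_singleton]
    by_cases h : c ∈ p
    · simp [h, ih]
    · rw [if_neg h, if_neg h, PySem.Dict.keys_insert_of_not_contains, ih]
      rw [PySem.Dict.contains_eq_decide_mem_keys, ih]
      simp [h]

lemma pv_M_contains (p : List Char) (c : Char) :
    (pvMap p).contains c = decide (c ∈ p) := by
  rw [PySem.Dict.contains_eq_decide_mem_keys, pv_M_keys]
  simp

lemma pv_idxOf_append_singleton_self (p : List Char) (c : Char) (h : c ∉ p) :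
    (p ++ [c]).idxOf c = p.length := by
  induction p with
  | nil => simp
  | cons a t ih =>
    simp at h
    simp [Ne.symm h.1, ih h.2]

-- stability of B's id under extending left past the first occurrence
lemma pv_ident_append (p q : List Char) (ch : Char) (h : ch ∈ p) :
    rs_ident (p ++ q) ch = rs_ident p ch := by
  unfold rs_ident
  rw [List.idxOf_append_of_mem h,
      List.take_append_of_le_length List.idxOf_le_length]

lemma pv_M_get? (p : List Char) (ch : Char) :
    (pvMap p).get? ch = if ch ∈ p then some (rs_ident p ch) else none := by
  induction p using List.reverseRecOn with
  | nil => simp [pvMap, PySem.Dict.ofList, PySem.Dict.update, PySem.Dict.get?,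
                 PySem.Dict.empty]
  | append_singleton p c ih =>
    rw [pv_M_append_singleton]
    by_cases hc : c ∈ p
    · rw [if_pos hc, ih]
      by_cases hm : ch ∈ p
      · rw [if_pos hm, if_pos (List.mem_append_left _ hm), pv_ident_append p [c] ch hm]
      · rw [if_neg hm, if_neg (by simp [hm]; rintro rfl; exact hm hc)]
    · rw [if_neg hc]
      by_cases he : ch = c
      · subst he
        rw [PySem.Dict.get?_insert_self, if_pos (List.mem_append_right _ (by simp))]
        unfold rs_ident
        rw [pv_idxOf_append_singleton_self p ch hc, List.take_append_of_le_length le_rfl]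
        simp
      · rw [PySem.Dict.get?_insert_of_ne _ _ he, ih]
        by_cases hm : ch ∈ p
        · rw [if_pos hm, if_pos (List.mem_append_left _ hm), pv_ident_append p [c] ch hm]
        · rw [if_neg hm, if_neg (by simp [hm, he])]

lemma pv_M_getD (p : List Char) (ch : Char) (h : ch ∈ p) (d : String) :
    (pvMap p).getD ch d = rs_ident p ch := by
  rw [PySem.Dict.getD_eq_get?_getD, pv_M_get?, if_pos h]
  rfl

-- A's fold, characterised: state after processing cs from prefix p
lemma pv_loopA (cs : List Char) : ∀ (p : List Char) (acc : List String),
    cs.foldl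
      (fun (st : PySem.Dict Char String × Int × List String) ch =>
        let mn := if st.1.contains ch then (st.1, st.2.1)
                  else (st.1.insert ch (PySem.Int.toStr st.2.1), st.2.1 + 1)
        (mn.1, mn.2, st.2.2 ++ [mn.1.getD ch ""]))
      (pvMap p, ((PySem.List.dedup p).length : Int), acc)
    = (pvMap (p ++ cs), ((PySem.List.dedup (p ++ cs)).length : Int),
       acc ++ cs.map (fun ch => rs_ident (p ++ cs) ch)) := by
  induction cs with
  | nil => intro p acc; simp
  | cons ch cs' ih =>
    intro p acc
    have hch : ch ∈ p ++ [ch] := List.mem_append_right _ (List.mem_singleton.2 rfl)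
    have hpp : (p ++ [ch]) ++ cs' = p ++ ch :: cs' := by simp
    have hout : (pvMap (p ++ [ch])).getD ch "" = rs_ident (p ++ ch :: cs') ch := by
      rw [pv_M_getD _ ch hch, ← hpp, pv_ident_append _ cs' ch hch]
    rw [List.foldl_cons]
    by_cases h : ch ∈ p
    · have e1 : pvMap (p ++ [ch]) = pvMap p := by
        rw [pv_M_append_singleton, if_pos h]
      have e2 : ((PySem.List.dedup (p ++ [ch])).length : Int)
          = ((PySem.List.dedup p).length : Int) := by
        rw [pv_dedup_append_singleton, if_pos h]
      have hv : (pvMap p).getD ch "" = rs_ident (p ++ ch :: cs') ch := e1 ▸ hout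
      simp only [pv_M_contains, h, decide_true, if_true]
      rw [hv, ← e1, ← e2, ih (p ++ [ch]), hpp]
      simp
    · have e1 : pvMap (p ++ [ch])
          = (pvMap p).insert ch (PySem.Int.toStr ((PySem.List.dedup p).length : Int)) := by
        rw [pv_M_append_singleton, if_neg h]
      have e2 : ((PySem.List.dedup (p ++ [ch])).length : Int)
          = ((PySem.List.dedup p).length : Int) + 1 := by
        rw [pv_dedup_append_singleton, if_neg h]; simp
      simp only [pv_M_contains, h, decide_false, Bool.false_eq_true, if_false]
      rw [← e1, ← e2, ih (p ++ [ch]), hout, hpp]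
      simp

-- ===== VERDICT =====
theorem relation_signature_spec : Claim_equal_relation_signature := by
  intro left right _
  unfold Spec_relation_signature relation_signature relation_signature_alt
  have h0 : (PySem.Dict.empty, (0 : Int), ([] : List String))
      = (pvMap [], ((PySem.List.dedup ([] : List Char)).length : Int),
         ([] : List String)) := rfl
  rw [h0, pv_loopA left.toList [] []]
  simp only [List.nil_append]
  congr 1
  congr 1
  apply List.map_congr_left
  intro c _
  rw [pv_M_contains]
  by_cases h : c ∈ left.toList
  · simp only [h, decide_true, if_true]
    exact pv_M_getD _ c h ""
  · simp [h]
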